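-- pv_equiv track=rewrite | github.com/allan-tulane/sp22-recitation-09-KeithMitchell9 | main.py | shortest_shortest_path
-- ===== SOURCE A (Python) =====
-- from heapq import heappush, heappop
--
-- def shortest_shortest_path(graph, source):
--
--   def helper(visited, frontier):
--     if len(frontier) == 0:
--       return visited
--     else:
--       distance, num_edges, node = heappop(frontier)
--       if node in visited:
--         return helper(visited, frontier)
--       else:
--         visited[node] = (distance, num_edges)
--         for neighbor, weight in graph[node]:
--           heappush(frontier, (distance + weight, num_edges + 1, neighbor))
--         return helper(visited, frontier)
--
--   frontier = []
--   heappush(frontier, (0, 0, source))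
--   visited = dict()
--   return helper(visited, frontier)
-- ===== SOURCE B (Python) =====
-- def shortest_shortest_path(graph, source):
--     # No priority queue at all: repeatedly scan all edges leaving the settled set
--     # and settle the lexicographically smallest (distance, num_edges, node) candidate.
--     visited = {}
--     best = (0, 0, source)
--     while best is not None:
--         distance, num_edges, node = best
--         visited[node] = (distance, num_edges)
--         best = None
--         for u, (du, eu) in visited.items():
--             for v, w in graph[u]:
--                 if v not in visited:
--                     t = (du + w, eu + 1, v)
--                     if best is None or t < best:
--                         best = t
--     return visited
-- ===== Notes on version B (the rewrite author's own statement) =====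
-- stated objective: alternative
-- what changed: The heap-plus-recursive-helper lazy Dijkstra is replaced by a Prim-style selection loop with no frontier structure at all: each round rescans all edges leaving the settled set and settles the lexicographically smallest (distance, num_edges, node) candidate, which provably equals the next node the heap version settles.
-- outside the precondition, e.g. on shortest_shortest_path({'a': [], 'b': [('c', 1)]}, 'a'): A returns {'a': (0, 0)}, B returns {'a': (0, 0)}
import Mathlib
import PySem

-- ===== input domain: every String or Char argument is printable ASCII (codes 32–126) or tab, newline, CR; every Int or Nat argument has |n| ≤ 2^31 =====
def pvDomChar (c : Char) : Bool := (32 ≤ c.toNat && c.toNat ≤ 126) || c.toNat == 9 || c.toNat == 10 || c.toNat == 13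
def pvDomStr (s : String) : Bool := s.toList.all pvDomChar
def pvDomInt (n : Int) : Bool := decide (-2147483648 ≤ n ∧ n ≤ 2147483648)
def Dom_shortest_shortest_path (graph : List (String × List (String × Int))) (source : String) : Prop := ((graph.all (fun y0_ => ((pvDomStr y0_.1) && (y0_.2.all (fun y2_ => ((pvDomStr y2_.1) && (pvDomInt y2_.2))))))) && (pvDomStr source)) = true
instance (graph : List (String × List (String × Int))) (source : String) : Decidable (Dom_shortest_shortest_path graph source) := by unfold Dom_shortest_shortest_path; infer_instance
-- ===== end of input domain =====

-- B replaces A's heap + recursive helper with a Prim-style selection loop that keeps NO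
-- frontier at all: each round rescans every edge leaving the settled set and settles the
-- lexicographically smallest (distance, num_edges, node) candidate; same returned dict.

-- Python tuple comparison (d, e, node) < (d', e', node'): lexicographic.
def pvTupLT (a b : Int × Int × String) : Bool :=
  decide (a.1 < b.1) || (decide (a.1 = b.1) &&
    (decide (a.2.1 < b.2.1) || (decide (a.2.1 = b.2.1) && decide (a.2.2 < b.2.2))))

def pvTupLE (a b : Int × Int × String) : Bool := !(pvTupLT b a)

-- all neighbor names listed anywhere in the graph, and the shared fuel bound
-- (a totality guard only: A pops at most 1 + |pvNbrs| times before every frontier entry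
-- is a visited node, B settles at most 1 + |pvNbrs| distinct nodes)
def pvNbrs (graph : List (String × List (String × Int))) : List String :=
  graph.flatMap (fun p => p.2.map Prod.fst)

def pvFuel (graph : List (String × List (String × Int))) : Nat :=
  (pvNbrs graph).length + 2

-- ===== PORT A =====
-- heappop on the heap modelled as a multiset (list): remove one minimal element (the
-- popped VALUE is Python-exact: heappop returns the least tuple; ties are equal tuples).
def pvPopMin : List (Int × Int × String) → Option ((Int × Int × String) × List (Int × Int × String))
  | [] => none
  | x :: xs =>
    match pvPopMin xs with
    | none => some (x, [])
    | some (m, rest) => if pvTupLE x m then some (x, xs) else some (m, x :: rest)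

-- the recursive helper; heappush = append at the end of the multiset
def pvHelperA (graph : List (String × List (String × Int))) :
    Nat → PySem.Dict String (Int × Int) → List (Int × Int × String) → PySem.Dict String (Int × Int)
  | 0, visited, _ => visited
  | fuel + 1, visited, frontier =>
    match pvPopMin frontier with
    | none => visited
    | some ((distance, num_edges, node), rest) =>
      if visited.contains node then
        pvHelperA graph fuel visited rest
      else
        let visited' := visited.insert node (distance, num_edges)
        match (PySem.Dict.mk graph).get? node with
        | none => visited'   -- Python raises KeyError here: outside Pre_
        | some adj =>
          pvHelperA graph fuel visited'
            (adj.foldl (fun fr p => fr ++ [(distance + p.2, num_edges + 1, p.1)]) rest)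

def shortest_shortest_path (graph : List (String × List (String × Int))) (source : String) : List (String × Int × Int) :=
  (pvHelperA graph (pvFuel graph) PySem.Dict.empty [(0, 0, source)]).items

-- ===== PORT B =====
-- the nested for-loops of Source B: scan every edge (u → v, w) with u settled and v not,
-- keeping the running minimum candidate tuple (None = no candidate yet)
def pvScan (graph : List (String × List (String × Int))) (visited : PySem.Dict String (Int × Int)) :
    Option (Int × Int × String) :=
  visited.items.foldl (fun best u =>
    (((PySem.Dict.mk graph).get? u.1).getD []).foldl (fun best p =>
      -- Python raises KeyError at graph[u] when u is missing: getD [] there, outside Pre_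
      if visited.contains p.1 then best
      else
        match best with
        | none => some (u.2.1 + p.2, u.2.2 + 1, p.1)
        | some b => if pvTupLT (u.2.1 + p.2, u.2.2 + 1, p.1) b then some (u.2.1 + p.2, u.2.2 + 1, p.1) else best)
      best) none

-- the while-loop of Source B: settle the pending best candidate, then rescan
def pvLoopB (graph : List (String × List (String × Int))) :
    Nat → PySem.Dict String (Int × Int) → Option (Int × Int × String) → PySem.Dict String (Int × Int)
  | 0, visited, _ => visited
  | _ + 1, visited, none => visited
  | fuel + 1, visited, some (distance, num_edges, node) =>
    let visited' := visited.insert node (distance, num_edges)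
    pvLoopB graph fuel visited' (pvScan graph visited')

def shortest_shortest_path_alt (graph : List (String × List (String × Int))) (source : String) : List (String × Int × Int) :=
  (pvLoopB graph (pvFuel graph) PySem.Dict.empty (some (0, 0, source))).items

-- ===== PRECONDITION & SPEC =====
-- A raises KeyError when it settles a node that is not a key of graph. Pre_ requires the
-- source and EVERY listed neighbor to be a key (a reachability condition would re-simulate
-- the traversal), so it also excludes some inputs on which A returns: graphs whose only
-- missing neighbors hang off nodes unreachable from the source.
def Pre_shortest_shortest_path (graph : List (String × List (String × Int))) (source : String) : Prop :=
  source ∈ graph.map Prod.fst ∧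
    ∀ p ∈ graph, ∀ q ∈ p.2, q.1 ∈ graph.map Prod.fst
instance (graph : List (String × List (String × Int))) (source : String) : Decidable (Pre_shortest_shortest_path graph source) := by unfold Pre_shortest_shortest_path; infer_instance

def pvWitness_shortest_shortest_path : (List (String × List (String × Int))) × String :=
  ([("a", [("b", 1), ("c", 4)]), ("b", [("c", 2)]), ("c", [])], "a")

def Spec_shortest_shortest_path (graph : List (String × List (String × Int))) (source : String) (out : List (String × Int × Int)) : Prop := out = shortest_shortest_path_alt graph source
instance (graph : List (String × List (String × Int))) (source : String) (out : List (String × Int × Int)) : Decidable (Spec_shortest_shortest_path graph source out) := by unfold Spec_shortest_shortest_path; infer_instance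

-- ===== CLAIM (what is proved, stated in full; the proofs are below) =====
def Claim_equal_shortest_shortest_path : Prop := ∀ (graph : List (String × List (String × Int))) (source : String), Dom_shortest_shortest_path graph source → Pre_shortest_shortest_path graph source → Spec_shortest_shortest_path graph source (shortest_shortest_path graph source)

-- ===== LEMMAS AND PROOFS =====

def pvKey (a : Int × Int × String) : Int ×ₗ Int ×ₗ String := toLex (a.1, toLex (a.2.1, a.2.2))

theorem pvTupLT_iff (a b : Int × Int × String) : pvTupLT a b = true ↔ pvKey a < pvKey b := by
  simp [pvTupLT, pvKey, Prod.Lex.lt_iff]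

theorem pvKey_inj (a b : Int × Int × String) (h : pvKey a = pvKey b) : a = b := by
  obtain ⟨a1, a2, a3⟩ := a; obtain ⟨b1, b2, b3⟩ := b
  simpa [pvKey, Prod.ext_iff] using h

theorem pvTupLE_iff (a b : Int × Int × String) : pvTupLE a b = true ↔ pvKey a ≤ pvKey b := by
  rw [pvTupLE, Bool.not_eq_true', Bool.eq_false_iff]
  rw [ne_eq, pvTupLT_iff, not_lt]

theorem pvTupLE_total (a b : Int × Int × String) (h : ¬ pvTupLE a b = true) : pvTupLE b a = true := by
  rw [pvTupLE_iff] at *; exact (le_of_not_ge (by exact fun hh => h hh))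

theorem pvTupLE_antisymm (a b : Int × Int × String) (h1 : pvTupLE a b = true) (h2 : pvTupLE b a = true) : a = b := by
  rw [pvTupLE_iff] at *; exact pvKey_inj _ _ (le_antisymm h1 h2)

theorem pvTupLE_trans (a b c : Int × Int × String) (h1 : pvTupLE a b = true) (h2 : pvTupLE b c = true) : pvTupLE a c = true := by
  rw [pvTupLE_iff] at *; exact le_trans h1 h2

theorem pvPopMin_none (l : List (Int × Int × String)) : pvPopMin l = none ↔ l = [] := by
  cases l with
  | nil => simp [pvPopMin]
  | cons x xs =>
    cases hx : pvPopMin xs with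
    | none => simp [pvPopMin, hx]
    | some p => obtain ⟨m, rest⟩ := p; simp only [pvPopMin, hx]; split <;> simp

theorem pvPopMin_perm (l : List (Int × Int × String)) (m : Int × Int × String) (r : List (Int × Int × String))
    (h : pvPopMin l = some (m, r)) : l.Perm (m :: r) := by
  induction l generalizing m r with
  | nil => simp [pvPopMin] at h
  | cons x xs ih =>
    cases hx : pvPopMin xs with
    | none =>
      have hxs := (pvPopMin_none xs).mp hx
      subst hxs
      simp [pvPopMin] at h
      obtain ⟨rfl, rfl⟩ := h
      exact List.Perm.refl _
    | some p =>
      obtain ⟨m', rest'⟩ := p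
      simp only [pvPopMin, hx] at h
      have hperm := ih m' rest' hx
      split at h <;> (injection h with h; injection h with h1 h2; subst h1; subst h2)
      · exact List.Perm.refl _
      · exact (hperm.cons x).trans (List.Perm.swap _ _ _)

theorem pvPopMin_min (l : List (Int × Int × String)) (m : Int × Int × String) (r : List (Int × Int × String))
    (h : pvPopMin l = some (m, r)) : ∀ x ∈ l, pvTupLE m x = true := by
  induction l generalizing m r with
  | nil => simp [pvPopMin] at h
  | cons x xs ih =>
    cases hx : pvPopMin xs with
    | none =>
      have hxs := (pvPopMin_none xs).mp hx
      subst hxs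
      simp [pvPopMin] at h
      obtain ⟨rfl, rfl⟩ := h
      intro y hy
      simp at hy
      subst hy
      simp [pvTupLE_iff]
    | some p =>
      obtain ⟨m', rest'⟩ := p
      simp only [pvPopMin, hx] at h
      have hmin := ih m' rest' hx
      split at h <;> (injection h with h; injection h with h1 h2; subst h1; subst h2) <;>
        rename_i hle <;> intro y hy <;> rcases List.mem_cons.mp hy with rfl | hy
      · simp [pvTupLE_iff]
      · exact pvTupLE_trans _ _ _ hle (hmin y hy)
      · exact pvTupLE_total _ _ hle
      · exact hmin y hy

-- abstract description of Source B's running minimum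
def pvMin1 (best : Option (Int × Int × String)) (t : Int × Int × String) : Option (Int × Int × String) :=
  match best with
  | none => some t
  | some b => if pvTupLT t b then some t else best

def pvMin (l : List (Int × Int × String)) : Option (Int × Int × String) := l.foldl pvMin1 none

-- candidate edges out of the settled set, as a list
def pvUnv (visited : PySem.Dict String (Int × Int)) (t : Int × Int × String) : Bool :=
  !(visited.contains t.2.2)

def pvCandOf (graph : List (String × List (String × Int))) (visited : PySem.Dict String (Int × Int))
    (u : String × (Int × Int)) : List (Int × Int × String) :=
  ((((PySem.Dict.mk graph).get? u.1).getD []).map (fun p => (u.2.1 + p.2, u.2.2 + 1, p.1))).filter (pvUnv visited)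

def pvCand (graph : List (String × List (String × Int))) (visited : PySem.Dict String (Int × Int)) :
    List (Int × Int × String) :=
  visited.items.flatMap (pvCandOf graph visited)

-- remaining adjacency budget for A's fuel
def pvRemAdj (visited : PySem.Dict String (Int × Int)) : List (String × List (String × Int)) → Nat
  | [] => 0
  | p :: l => (if visited.contains p.1 then 0 else p.2.length) + pvRemAdj visited l

theorem pvMin_fold_spec (l : List (Int × Int × String)) :
    ∀ b : Int × Int × String, ∃ m, l.foldl pvMin1 (some b) = some m ∧ m ∈ b :: l ∧
      ∀ x ∈ b :: l, pvTupLE m x = true := by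
  induction l with
  | nil =>
    intro b
    refine ⟨b, rfl, List.mem_singleton.mpr rfl, ?_⟩
    intro x hx
    rw [List.mem_singleton.mp hx]
    simp [pvTupLE_iff]
  | cons t l ih =>
    intro b
    simp only [List.foldl_cons]
    by_cases hlt : pvTupLT t b = true
    · obtain ⟨m, hm, hmem, hmin⟩ := ih t
      have hstep : pvMin1 (some b) t = some t := by simp [pvMin1, hlt]
      refine ⟨m, by rw [hstep]; exact hm, ?_, ?_⟩
      · rcases List.mem_cons.mp hmem with rfl | hmem
        · exact List.mem_cons_of_mem _ (List.mem_cons_self ..)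
        · exact List.mem_cons_of_mem _ (List.mem_cons_of_mem _ hmem)
      · intro x hx
        rcases List.mem_cons.mp hx with rfl | hx
        · have h1 : pvTupLE m t = true := hmin t (List.mem_cons_self ..)
          have h2 : pvTupLE t x = true := by
            rw [pvTupLE_iff]; rw [pvTupLT_iff] at hlt; exact le_of_lt hlt
          exact pvTupLE_trans _ _ _ h1 h2
        · exact hmin x hx
    · obtain ⟨m, hm, hmem, hmin⟩ := ih b
      have hstep : pvMin1 (some b) t = some b := by simp [pvMin1, hlt]
      refine ⟨m, by rw [hstep]; exact hm, ?_, ?_⟩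
      · rcases List.mem_cons.mp hmem with rfl | hmem
        · exact List.mem_cons_self ..
        · exact List.mem_cons_of_mem _ (List.mem_cons_of_mem _ hmem)
      · intro x hx
        rcases List.mem_cons.mp hx with rfl | hx
        · exact hmin x (List.mem_cons_self ..)
        · rcases List.mem_cons.mp hx with rfl | hx
          · have h1 : pvTupLE m b = true := hmin b (List.mem_cons_self ..)
            have h2 : pvTupLE b x = true := by
              simpa [pvTupLE] using hlt
            exact pvTupLE_trans _ _ _ h1 h2
          · exact hmin x (List.mem_cons_of_mem _ hx)

theorem pvMin_eq_some (l : List (Int × Int × String)) (m : Int × Int × String)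
    (hm : m ∈ l) (hmin : ∀ x ∈ l, pvTupLE m x = true) : pvMin l = some m := by
  cases l with
  | nil => simp at hm
  | cons x l =>
    obtain ⟨m', hm', hmem', hmin'⟩ := pvMin_fold_spec l x
    have hfold : pvMin (x :: l) = some m' := by
      simpa [pvMin, pvMin1] using hm'
    have h1 : pvTupLE m m' = true := hmin m' hmem'
    have h2 : pvTupLE m' m = true := hmin' m hm
    rw [hfold, pvTupLE_antisymm _ _ h2 h1]

theorem pvScan_inner (vis : PySem.Dict String (Int × Int)) (u : String × (Int × Int)) :
    ∀ (adj : List (String × Int)) (b : Option (Int × Int × String)),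
      adj.foldl (fun best p =>
        if vis.contains p.1 then best
        else
          match best with
          | none => some (u.2.1 + p.2, u.2.2 + 1, p.1)
          | some bb => if pvTupLT (u.2.1 + p.2, u.2.2 + 1, p.1) bb then some (u.2.1 + p.2, u.2.2 + 1, p.1) else best) b
      = ((adj.map (fun p => (u.2.1 + p.2, u.2.2 + 1, p.1))).filter (pvUnv vis)).foldl pvMin1 b := by
  intro adj
  induction adj with
  | nil => intro b; rfl
  | cons p adj ih =>
    intro b
    simp only [List.foldl_cons, List.map_cons, List.filter_cons]
    have hunv : pvUnv vis (u.2.1 + p.2, u.2.2 + 1, p.1) = !(vis.contains p.1) := by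
      simp [pvUnv]
    by_cases h : vis.contains p.1 = true
    · rw [hunv, h]
      simpa [h] using ih b
    · have h' : vis.contains p.1 = false := by simpa using h
      rw [hunv, h']
      have hstep : (if false = true then b
          else match b with
          | none => some (u.2.1 + p.2, u.2.2 + 1, p.1)
          | some bb => if pvTupLT (u.2.1 + p.2, u.2.2 + 1, p.1) bb then some (u.2.1 + p.2, u.2.2 + 1, p.1) else b)
          = pvMin1 b (u.2.1 + p.2, u.2.2 + 1, p.1) := by
        cases b <;> simp [pvMin1]
      simp only [Bool.not_false]
      rw [if_pos trivial, List.foldl_cons, hstep, ih]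

theorem pvScan_eq (graph : List (String × List (String × Int))) (visited : PySem.Dict String (Int × Int)) :
    pvScan graph visited = pvMin (pvCand graph visited) := by
  unfold pvScan pvMin pvCand
  rw [List.foldl_flatMap]
  congr 1
  funext b u
  rw [pvScan_inner]
  rfl

theorem pvGet?_mk_mem (l : List (String × List (String × Int))) (k : String) (v : List (String × Int))
    (h : (PySem.Dict.mk l).get? k = some v) : (k, v) ∈ l := by
  induction l with
  | nil =>
    rw [show PySem.Dict.mk ([] : List (String × List (String × Int))) = PySem.Dict.empty from rfl,
      PySem.Dict.get?_empty] at h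
    cases h
  | cons p l ih =>
    obtain ⟨pk, pv⟩ := p
    rw [PySem.Dict.get?_mk_cons] at h
    by_cases hk : pk == k
    · rw [if_pos hk] at h
      injection h with h
      have hpk : pk = k := by simpa using hk
      subst hpk; subst h
      exact List.mem_cons_self ..
    · rw [if_neg hk] at h
      exact List.mem_cons_of_mem _ (ih h)

theorem pvGet?_mk_isSome (l : List (String × List (String × Int))) (k : String)
    (h : k ∈ l.map Prod.fst) : ∃ v, (PySem.Dict.mk l).get? k = some v := by
  induction l with
  | nil => simp at h
  | cons p l ih =>
    rw [PySem.Dict.get?_mk_cons]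
    by_cases hk : p.1 == k
    · exact ⟨p.2, by rw [if_pos hk]⟩
    · rw [if_neg hk]
      apply ih
      rcases (by simpa using h : k = p.1 ∨ ∃ x, (k, x) ∈ l) with h1 | h1
      · exact absurd (by simp [← h1]) hk
      · obtain ⟨x, hx⟩ := h1
        exact List.mem_map.mpr ⟨(k, x), hx, rfl⟩

theorem pvRemAdj_mono (vis vis' : PySem.Dict String (Int × Int))
    (h : ∀ x, vis.contains x = true → vis'.contains x = true) :
    ∀ l, pvRemAdj vis' l ≤ pvRemAdj vis l := by
  intro l
  induction l with
  | nil => simp [pvRemAdj]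
  | cons p l ih =>
    simp only [pvRemAdj]
    have : (if vis'.contains p.1 then 0 else p.2.length) ≤ (if vis.contains p.1 then 0 else p.2.length) := by
      by_cases hv : vis.contains p.1 = true
      · simp [hv, h p.1 hv]
      · simp [hv]
        split <;> omega
    omega

theorem pvRemAdj_settle (vis : PySem.Dict String (Int × Int)) (node : String) (val : Int × Int)
    (adj : List (String × Int)) (hvis : vis.contains node = false) :
    ∀ l, (node, adj) ∈ l → pvRemAdj (vis.insert node val) l + adj.length ≤ pvRemAdj vis l := by
  have hmono : ∀ l, pvRemAdj (vis.insert node val) l ≤ pvRemAdj vis l := by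
    apply pvRemAdj_mono
    intro x hx
    rw [PySem.Dict.contains_insert]
    simp [hx]
  intro l hmem
  induction l with
  | nil => simp at hmem
  | cons p l ih =>
    simp only [pvRemAdj]
    rcases List.mem_cons.mp hmem with rfl | hmem
    · have h1 : vis.contains node = false := hvis
      have h2 : (vis.insert node val).contains (node, adj).1 = true := by
        rw [PySem.Dict.contains_insert]; simp
      rw [h2]
      have := hmono l
      simp only [h1, Bool.false_eq_true, if_true, if_false]
      omega
    · have hhead : (if (vis.insert node val).contains p.1 then 0 else p.2.length)
          ≤ (if vis.contains p.1 then 0 else p.2.length) := by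
        by_cases hv : vis.contains p.1 = true
        · have : (vis.insert node val).contains p.1 = true := by
            rw [PySem.Dict.contains_insert]; simp [hv]
          simp [hv, this]
        · simp [hv]
          split <;> omega
      have := ih hmem
      omega

theorem pvRemAdj_le (vis : PySem.Dict String (Int × Int)) :
    ∀ l, pvRemAdj vis l ≤ (pvNbrs l).length := by
  intro l
  induction l with
  | nil => simp [pvRemAdj, pvNbrs]
  | cons p l ih =>
    simp only [pvRemAdj, pvNbrs, List.flatMap_cons, List.length_append, List.length_map]
    have : (if vis.contains p.1 then 0 else p.2.length) ≤ p.2.length := by split <;> omega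
    simp only [pvNbrs] at ih
    omega

theorem pvUnv_insert (vis : PySem.Dict String (Int × Int)) (node : String) (val : Int × Int)
    (t : Int × Int × String) :
    pvUnv (vis.insert node val) t = (pvUnv vis t && !(t.2.2 == node)) := by
  simp only [pvUnv, PySem.Dict.contains_insert, Bool.not_or, Bool.and_comm]

theorem pvCand_insert (graph : List (String × List (String × Int)))
    (vis : PySem.Dict String (Int × Int)) (node : String) (d e : Int)
    (adj : List (String × Int)) (hvis : vis.contains node = false)
    (hadj : (PySem.Dict.mk graph).get? node = some adj) :
    pvCand graph (vis.insert node (d, e)) =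
      (pvCand graph vis).filter (fun t => !(t.2.2 == node)) ++
        (adj.map (fun p => (d + p.2, e + 1, p.1))).filter (pvUnv (vis.insert node (d, e))) := by
  unfold pvCand
  rw [PySem.Dict.items_insert_of_not_contains _ _ hvis, List.flatMap_append]
  congr 1
  · rw [List.filter_flatMap]
    congr 1
    funext u
    unfold pvCandOf
    rw [List.filter_filter]
    apply List.filter_congr
    intro t _
    rw [pvUnv_insert, Bool.and_comm]
  · simp [pvCandOf, hadj]

-- the main simulation: A's heap loop = B's rescan loop, given the cut invariant
theorem pvMain (graph : List (String × List (String × Int))) (source : String)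
    (hpre : ∀ p ∈ graph, ∀ q ∈ p.2, q.1 ∈ graph.map Prod.fst)
    (hsrc : source ∈ graph.map Prod.fst) :
    ∀ fA : Nat, ∀ (visited : PySem.Dict String (Int × Int)) (frontier : List (Int × Int × String)) (fB : Nat),
      frontier.length + pvRemAdj visited graph ≤ fA →
      pvFuel graph ≤ fB + visited.items.length →
      (frontier.filter (pvUnv visited)).Perm (pvCand graph visited) →
      (∀ t ∈ frontier, t.2.2 = source ∨ t.2.2 ∈ pvNbrs graph) →
      (∀ u ∈ visited.items, u.1 = source ∨ u.1 ∈ pvNbrs graph) →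
      visited.keys.Nodup →
      pvHelperA graph fA visited frontier = pvLoopB graph fB visited (pvScan graph visited) := by
  intro fA
  induction fA with
  | zero =>
    intro visited frontier fB hfA hfB hinv hfr hvisit hnd
    have hfr0 : frontier = [] := by
      cases frontier with
      | nil => rfl
      | cons x xs => simp at hfA
    subst hfr0
    have hcand : pvCand graph visited = [] := (List.Perm.nil_eq (by simpa using hinv)).symm
    rw [pvScan_eq, hcand]
    have hone : pvMin ([] : List (Int × Int × String)) = none := rfl
    rw [hone]
    cases fB <;> rfl
  | succ fA ih =>
    intro visited frontier fB hfA hfB hinv hfr hvisit hnd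
    cases hpop : pvPopMin frontier with
    | none =>
      have hfr0 := (pvPopMin_none frontier).mp hpop
      subst hfr0
      have hcand : pvCand graph visited = [] := (List.Perm.nil_eq (by simpa using hinv)).symm
      rw [pvScan_eq, hcand]
      have hone : pvMin ([] : List (Int × Int × String)) = none := rfl
      rw [hone]
      cases fB <;> rfl
    | some pr =>
      obtain ⟨⟨d, e, node⟩, rest⟩ := pr
      have hperm := pvPopMin_perm _ _ _ hpop
      have hmin := pvPopMin_min _ _ _ hpop
      have hlen : frontier.length = rest.length + 1 := by simpa using hperm.length_eq
      by_cases hvis : visited.contains node = true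
      · -- A pops an already-visited node and merely skips it; B's state is unchanged
        have lhs : pvHelperA graph (fA + 1) visited frontier = pvHelperA graph fA visited rest := by
          simp [pvHelperA, hpop, hvis]
        rw [lhs]
        apply ih visited rest fB (by omega) hfB
        · have h1 := (hperm.filter (pvUnv visited)).symm
          have h2 : (((d, e, node) :: rest).filter (pvUnv visited)) = rest.filter (pvUnv visited) := by
            simp [pvUnv, hvis]
          rw [h2] at h1
          exact h1.trans hinv
        · intro t ht; exact hfr t (hperm.mem_iff.mpr (List.mem_cons_of_mem _ ht))
        · exact hvisit
        · exact hnd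
      · -- A settles node; the cut invariant makes it B's scanned minimum as well
        have hvisF : visited.contains node = false := by simpa using hvis
        have hnode_mem : ((d, e, node) : Int × Int × String) ∈ frontier :=
          hperm.mem_iff.mpr (List.mem_cons_self ..)
        have hnodekey : node ∈ graph.map Prod.fst := by
          rcases hfr _ hnode_mem with h1 | h1
          · rw [show ((d, e, node) : Int × Int × String).2.2 = node from rfl] at h1
            rw [h1]; exact hsrc
          · obtain ⟨p, hp, hq⟩ := List.mem_flatMap.mp h1
            obtain ⟨q, hq1, hq2⟩ := List.mem_map.mp hq
            exact List.mem_map.mpr (by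
              obtain ⟨p', hp', hp2⟩ := List.mem_map.mp (hq2 ▸ hpre p hp q hq1)
              exact ⟨p', hp', hp2⟩)
        obtain ⟨adj, hadj⟩ := pvGet?_mk_isSome graph node hnodekey
        have hga : (node, adj) ∈ graph := pvGet?_mk_mem _ _ _ hadj
        have lhs : pvHelperA graph (fA + 1) visited frontier
            = pvHelperA graph fA (visited.insert node (d, e))
                (rest ++ adj.map (fun p => (d + p.2, e + 1, p.1))) := by
          simp only [pvHelperA, hpop, hvis, Bool.false_eq_true, if_false, hadj,
            PySem.List.foldl_append_singleton_eq_map]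
        have hscan : pvScan graph visited = some (d, e, node) := by
          rw [pvScan_eq]
          apply pvMin_eq_some
          · exact hinv.mem_iff.mp (List.mem_filter.mpr ⟨hnode_mem, by simp [pvUnv, hvisF]⟩)
          · intro x hx
            exact hmin x (List.mem_filter.mp (hinv.mem_iff.mpr hx)).1
        have hsize : visited.items.length ≤ (pvNbrs graph).length + 1 := by
          have hkeys : visited.keys = visited.items.map Prod.fst := rfl
          have hsub : visited.keys ⊆ source :: pvNbrs graph := by
            intro k hk
            rw [hkeys] at hk
            obtain ⟨u, hu, rfl⟩ := List.mem_map.mp hk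
            rcases hvisit u hu with h1 | h1
            · rw [h1]; exact List.mem_cons_self ..
            · exact List.mem_cons_of_mem _ h1
          have hlenk : visited.keys.length = visited.items.length := by
            rw [hkeys]; exact List.length_map ..
          have : visited.keys.length ≤ (source :: pvNbrs graph).length := by
            calc visited.keys.length = visited.keys.toFinset.card :=
                (List.toFinset_card_of_nodup hnd).symm
            _ ≤ (source :: pvNbrs graph).toFinset.card :=
                Finset.card_le_card (fun x hx => List.mem_toFinset.mpr (hsub (List.mem_toFinset.mp hx)))
            _ ≤ (source :: pvNbrs graph).length := (source :: pvNbrs graph).toFinset_card_le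
          simp only [List.length_cons] at this
          omega
        obtain ⟨fB', rfl⟩ : ∃ fB', fB = fB' + 1 := ⟨fB - 1, by unfold pvFuel at hfB; omega⟩
        have rhs : pvLoopB graph (fB' + 1) visited (pvScan graph visited)
            = pvLoopB graph fB' (visited.insert node (d, e))
                (pvScan graph (visited.insert node (d, e))) := by
          rw [hscan]
          rfl
        rw [lhs, rhs]
        have hitems' : (visited.insert node (d, e)).items = visited.items ++ [(node, (d, e))] :=
          PySem.Dict.items_insert_of_not_contains _ _ hvisF
        apply ih
        · -- A's fuel: settling consumes the node's adjacency budget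
          have hset := pvRemAdj_settle visited node (d, e) adj hvisF graph hga
          have hlen2 : (rest ++ adj.map (fun p => ((d + p.2 : Int), (e + 1 : Int), p.1))).length
              = rest.length + adj.length := by simp
          omega
        · rw [hitems']
          simp only [List.length_append, List.length_singleton]
          omega
        · -- the cut invariant after the settle
          rw [pvCand_insert graph visited node d e adj hvisF hadj, List.filter_append]
          apply List.Perm.append _ (List.Perm.refl _)
          have hff : frontier.filter (pvUnv (visited.insert node (d, e)))
              = (frontier.filter (pvUnv visited)).filter (fun t => !(t.2.2 == node)) := by
            rw [List.filter_filter]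
            apply List.filter_congr
            intro t _
            rw [pvUnv_insert, Bool.and_comm]
          have h1 : (frontier.filter (pvUnv (visited.insert node (d, e)))).Perm
              (rest.filter (pvUnv (visited.insert node (d, e)))) := by
            have := hperm.filter (pvUnv (visited.insert node (d, e)))
            have hhead : pvUnv (visited.insert node (d, e)) (d, e, node) = false := by
              rw [pvUnv_insert]; simp
            simpa [List.filter_cons, hhead] using this
          have h2 := hinv.filter (fun t => !(t.2.2 == node))
          rw [← hff] at h2
          exact h1.symm.trans h2
        · intro t ht
          rcases List.mem_append.mp ht with ht | ht
          · exact hfr t (hperm.mem_iff.mpr (List.mem_cons_of_mem _ ht))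
          · right
            obtain ⟨p, hp, rfl⟩ := List.mem_map.mp ht
            exact List.mem_flatMap.mpr ⟨(node, adj), hga, List.mem_map.mpr ⟨p, hp, rfl⟩⟩
        · intro u hu
          rw [hitems'] at hu
          rcases List.mem_append.mp hu with hu | hu
          · exact hvisit u hu
          · have : u = (node, (d, e)) := by simpa using hu
            subst this
            exact hfr _ hnode_mem
        · exact PySem.Dict.nodup_keys_insert _ _ _ hnd

-- the shared first step: A pops the initial (0, 0, source) entry and B settles its
-- initial best = (0, 0, source); both reach the one-node settled state
theorem pvStart (graph : List (String × List (String × Int))) (source : String)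
    (hpre : ∀ p ∈ graph, ∀ q ∈ p.2, q.1 ∈ graph.map Prod.fst)
    (hsrc : source ∈ graph.map Prod.fst) :
    pvHelperA graph (pvFuel graph) PySem.Dict.empty [(0, 0, source)]
      = pvLoopB graph (pvFuel graph) PySem.Dict.empty (some (0, 0, source)) := by
  obtain ⟨adj, hadj⟩ := pvGet?_mk_isSome graph source hsrc
  have hga : (source, adj) ∈ graph := pvGet?_mk_mem _ _ _ hadj
  have hce : (PySem.Dict.empty : PySem.Dict String (Int × Int)).contains source = false := by simp
  have hitems1 : (PySem.Dict.empty.insert source ((0 : Int), (0 : Int))).items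
      = [(source, ((0 : Int), (0 : Int)))] := by
    rw [PySem.Dict.items_insert_of_not_contains _ _ hce]
    rfl
  have stepA : pvHelperA graph (pvFuel graph) PySem.Dict.empty [(0, 0, source)]
      = pvHelperA graph ((pvNbrs graph).length + 1)
          (PySem.Dict.empty.insert source (0, 0))
          (adj.map (fun p => ((0 : Int) + p.2, (0 : Int) + 1, p.1))) := by
    show pvHelperA graph ((pvNbrs graph).length + 1 + 1) _ _ = _
    simp only [pvHelperA,
      show pvPopMin [((0 : Int), (0 : Int), source)] = some ((0, 0, source), []) from rfl,
      hce, Bool.false_eq_true, if_false, hadj,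
      PySem.List.foldl_append_singleton_eq_map, List.nil_append]
  have stepB : pvLoopB graph (pvFuel graph) PySem.Dict.empty (some (0, 0, source))
      = pvLoopB graph ((pvNbrs graph).length + 1)
          (PySem.Dict.empty.insert source (0, 0))
          (pvScan graph (PySem.Dict.empty.insert source (0, 0))) := rfl
  rw [stepA, stepB]
  have hcand : pvCand graph (PySem.Dict.empty.insert source (0, 0))
      = (adj.map (fun p => ((0 : Int) + p.2, (0 : Int) + 1, p.1))).filter
          (pvUnv (PySem.Dict.empty.insert source (0, 0))) := by
    unfold pvCand pvCandOf
    rw [hitems1]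
    simp [hadj]
  apply pvMain graph source hpre hsrc
  · -- A's fuel bound
    have hset := pvRemAdj_settle PySem.Dict.empty source (0, 0) adj hce graph hga
    have hle := pvRemAdj_le PySem.Dict.empty graph
    simp only [List.length_map]
    unfold pvNbrs at *
    omega
  · -- B's fuel bound
    rw [hitems1]
    unfold pvFuel
    simp
  · rw [hcand]
  · intro t ht
    right
    obtain ⟨p, hp, rfl⟩ := List.mem_map.mp ht
    exact List.mem_flatMap.mpr ⟨(source, adj), hga, List.mem_map.mpr ⟨p, hp, rfl⟩⟩
  · intro u hu
    rw [hitems1] at hu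
    left
    have : u = (source, ((0 : Int), (0 : Int))) := by simpa using hu
    rw [this]
  · exact PySem.Dict.nodup_keys_insert _ _ _ (by simp)

-- ===== VERDICT (by name: the statement is the Claim_ definition above) =====
theorem shortest_shortest_path_spec : Claim_equal_shortest_shortest_path := by
  intro graph source _ hpre
  obtain ⟨hsrc, hpre2⟩ := hpre
  unfold Spec_shortest_shortest_path shortest_shortest_path shortest_shortest_path_alt
  exact congrArg PySem.Dict.items (pvStart graph source hpre2 hsrc)
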